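-- pv_equiv track=rewrite | github.com/whatf0xx/Glide | Main.py | remove_trailing_zeros
-- ===== SOURCE A (Python) =====
-- import copy
--
-- def remove_trailing_zeros(s: list[int]) -> list[int]:
--     if not s:
--         return s
--
--     if s == [0]:
--         return s
--
--     decs = copy.copy(s)
--     decs.reverse()
--     leading_zero = False
--     new_decs = [a for a in decs if (leading_zero or a != 0) and (leading_zero := True)]
--     new_decs.reverse()
--     return new_decs
-- ===== SOURCE B (Python) =====
-- def remove_trailing_zeros(s: list[int]) -> list[int]:
--     if not s:
--         return s
--     if s == [0]:
--         return s
--     i = len(s)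
--     while i > 0 and s[i - 1] == 0:
--         i -= 1
--     return s[:i]
-- ===== Notes on version B (the rewrite author's own statement) =====
-- stated objective: simpler
-- what changed: Instead of copying the list, reversing it, filtering with a walrus-flag comprehension and reversing back, B scans backwards from the end to find the trailing-zero boundary and returns one slice.
import Mathlib
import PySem

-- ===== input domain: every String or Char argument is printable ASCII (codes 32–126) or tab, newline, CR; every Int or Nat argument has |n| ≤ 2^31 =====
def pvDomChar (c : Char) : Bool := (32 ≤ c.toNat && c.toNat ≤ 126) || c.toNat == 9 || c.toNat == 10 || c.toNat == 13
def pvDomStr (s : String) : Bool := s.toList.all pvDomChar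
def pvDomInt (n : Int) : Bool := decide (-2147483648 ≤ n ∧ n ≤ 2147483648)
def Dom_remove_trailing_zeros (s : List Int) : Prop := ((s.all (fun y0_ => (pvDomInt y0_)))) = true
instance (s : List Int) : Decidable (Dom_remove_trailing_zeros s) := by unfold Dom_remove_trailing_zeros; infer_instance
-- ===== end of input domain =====

-- B replaces A's copy/reverse/walrus-filter/reverse pipeline by a backwards boundary scan and a single slice (objective: simpler).

-- ===== PORT A =====
-- the comprehension's walrus flag: the flag becomes true exactly when the condition's
-- first conjunct holds (short-circuit `and`), i.e. exactly when the element is kept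
def rtzStep (st : Bool × List Int) (a : Int) : Bool × List Int :=
  if st.1 || a != 0 then (true, st.2 ++ [a]) else (st.1, st.2)

def remove_trailing_zeros (s : List Int) : List Int :=
  if s = [] then s
  else if s = [0] then s
  else
    let decs := s.reverse
    let new_decs := (decs.foldl rtzStep (false, [])).2
    new_decs.reverse

-- ===== PORT B =====
-- `while i > 0 and s[i-1] == 0: i -= 1`, started at i = len(s)
def rtzLoop (s : List Int) : Nat → Nat
  | 0 => 0
  | i + 1 => if s.getD i 0 == 0 then rtzLoop s i else i + 1

def remove_trailing_zeros_alt (s : List Int) : List Int :=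
  if s = [] then s
  else if s = [0] then s
  else s.take (rtzLoop s s.length)    -- s[:i]

-- ===== PRECONDITION & SPEC =====
def Spec_remove_trailing_zeros (s : List Int) (out : List Int) : Prop := out = remove_trailing_zeros_alt s
instance (s : List Int) (out : List Int) : Decidable (Spec_remove_trailing_zeros s out) := by unfold Spec_remove_trailing_zeros; infer_instance

-- ===== CLAIM (what is proved, stated in full; the proofs are below) =====
def Claim_equal_remove_trailing_zeros : Prop := ∀ (s : List Int), Dom_remove_trailing_zeros s → Spec_remove_trailing_zeros s (remove_trailing_zeros s)

-- ===== LEMMAS AND PROOFS =====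

-- A's fold once the flag is true keeps everything
theorem rtz_fold_true (l : List Int) (acc : List Int) :
    l.foldl rtzStep (true, acc) = (true, acc ++ l) := by
  induction l generalizing acc with
  | nil => simp
  | cons x t ih =>
    rw [List.foldl_cons]
    have h : rtzStep (true, acc) x = (true, acc ++ [x]) := by simp [rtzStep]
    rw [h, ih]
    simp

-- A's fold with the flag still false drops the leading zeros
theorem rtz_fold_false (l : List Int) :
    (l.foldl rtzStep (false, [])).2 = l.dropWhile (fun a => a == 0) := by
  induction l with
  | nil => simp
  | cons x t ih =>
    rw [List.foldl_cons]
    by_cases hx : x = 0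
    · have h : rtzStep (false, []) x = (false, []) := by simp [rtzStep, hx]
      rw [h, ih]
      simp [List.dropWhile, hx]
    · have h : rtzStep (false, []) x = (true, [x]) := by simp [rtzStep, hx]
      have hb : (x == 0) = false := by simp [hx]
      rw [h, rtz_fold_true]
      simp [List.dropWhile, hb]

theorem rtzLoop_le (s : List Int) (i : Nat) : rtzLoop s i ≤ i := by
  induction i with
  | zero => simp [rtzLoop]
  | succ n ih => simp only [rtzLoop]; split <;> omega

-- appending past the scanned prefix does not change the loop
theorem rtzLoop_append (l : List Int) (x : Int) (i : Nat) (h : i ≤ l.length) :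
    rtzLoop (l ++ [x]) i = rtzLoop l i := by
  induction i with
  | zero => rfl
  | succ n ih =>
    have hn : n < l.length := by omega
    simp only [rtzLoop, List.getD_append _ _ _ _ hn, ih (by omega)]

-- B's boundary scan computes exactly A's reverse-dropWhile-reverse
theorem rtz_take (s : List Int) :
    s.take (rtzLoop s s.length) = (s.reverse.dropWhile (fun a => a == 0)).reverse := by
  induction s using List.reverseRecOn with
  | nil => rfl
  | append_singleton l x ih =>
    by_cases hx : x = 0
    · subst hx
      have hlen : (l ++ [(0 : Int)]).length = l.length + 1 := by simp
      have hget : (l ++ [(0 : Int)]).getD l.length 0 = 0 := by simp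
      rw [hlen]
      simp only [rtzLoop, hget, beq_self_eq_true, if_true]
      rw [rtzLoop_append l 0 l.length (le_refl _),
          List.take_append_of_le_length (rtzLoop_le l l.length), ih]
      simp
    · have hlen : (l ++ [x]).length = l.length + 1 := by simp
      have hget : (l ++ [x]).getD l.length 0 = x := by simp
      rw [hlen]
      simp only [rtzLoop, hget]
      simp [hx]

-- ===== VERDICT (by name: the statement is the Claim_ definition above) =====
theorem remove_trailing_zeros_spec : Claim_equal_remove_trailing_zeros := by
  intro s _
  unfold Spec_remove_trailing_zeros remove_trailing_zeros remove_trailing_zeros_alt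
  split
  · rfl
  · split
    · rfl
    · simp only [rtz_fold_false, rtz_take]
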